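-- pv_equiv track=rewrite | github.com/romkaimp/summer_practise | JSONencoder/JSON_encoder.py | _get_eq
-- ===== SOURCE A (Python) =====
-- def _get_eq(raw, b_p) -> str:
--     res = []
--     res.append(f"{raw[0]}x_1")
--     for i in range(len(raw) - 1):
--         if raw[i + 1] >= 0:
--             res.append(f"+{raw[i + 1]}x_{i + 2}")
--         else:
--             res.append(f"{raw[i + 1]}x_{i + 2}")
--
--     res.append(f"={b_p[0]}")
--     return ("").join(res)
-- ===== SOURCE B (Python) =====
-- def _get_eq(raw, b_p) -> str:
--     # Join all unsigned terms with '+', then textually rewrite "+-" -> "-":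
--     # a '+' occurs only at join boundaries, and it is followed by '-' exactly
--     # when the next coefficient is negative, so the rewrite yields the signed form.
--     body = '+'.join(f"{c}x_{i}" for i, c in enumerate(raw, 1)).replace('+-', '-')
--     return f"{body}={b_p[0]}"
-- ===== Notes on version B (the rewrite author's own statement) =====
-- stated objective: alternative
-- what changed: B never branches on a coefficient's sign: it joins all unsigned terms f"{c}x_{i}" with '+' and then performs one textual rewrite replace('+-','-') on the joined string (correct because '+' occurs only at join boundaries and is followed by '-' exactly for negative coefficients), instead of A's special-cased first term plus a sign branch inside the loop.
import Mathlib
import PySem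

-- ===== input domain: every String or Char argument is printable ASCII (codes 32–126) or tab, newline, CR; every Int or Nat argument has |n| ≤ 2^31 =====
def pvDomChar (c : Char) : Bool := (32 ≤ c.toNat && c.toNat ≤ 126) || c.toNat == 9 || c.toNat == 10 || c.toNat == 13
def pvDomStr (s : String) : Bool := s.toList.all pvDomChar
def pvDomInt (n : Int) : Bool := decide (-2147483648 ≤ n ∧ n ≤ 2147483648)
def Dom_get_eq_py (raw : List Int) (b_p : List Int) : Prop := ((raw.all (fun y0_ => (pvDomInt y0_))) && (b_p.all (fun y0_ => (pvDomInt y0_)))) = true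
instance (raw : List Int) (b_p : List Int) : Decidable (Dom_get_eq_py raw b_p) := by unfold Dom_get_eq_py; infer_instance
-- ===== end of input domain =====

-- B joins the unsigned terms with '+' and fixes the signs with one textual
-- rewrite replace('+-','-'), instead of A's special-cased first term plus a
-- sign branch inside the loop (objective: alternative decomposition).

-- ===== PORT A =====
def get_eq_py (raw : List Int) (b_p : List Int) : String :=
  let res : List String := []
  -- res.append(f"{raw[0]}x_1")  (raw[0]: Pre_ guarantees raw ≠ [])
  let res := res ++ [PySem.Int.toStr (PySem.List.pyGetD raw 0 0) ++ "x_1"]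
  -- for i in range(len(raw) - 1): …
  let res := (PySem.List.pyRange 0 (PySem.List.len raw - 1) 1).foldl (fun res i =>
    if PySem.List.pyGetD raw (i + 1) 0 ≥ 0 then
      res ++ ["+" ++ PySem.Int.toStr (PySem.List.pyGetD raw (i + 1) 0) ++ "x_" ++ PySem.Int.toStr (i + 2)]
    else
      res ++ [PySem.Int.toStr (PySem.List.pyGetD raw (i + 1) 0) ++ "x_" ++ PySem.Int.toStr (i + 2)]) res
  -- res.append(f"={b_p[0]}")  (b_p[0]: Pre_ guarantees b_p ≠ [])
  let res := res ++ ["=" ++ PySem.Int.toStr (PySem.List.pyGetD b_p 0 0)]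
  PySem.Str.join "" res

-- ===== PORT B =====
-- the comprehension body f"{c}x_{i}" for the pair (i, c)
def pvTermB (ic : Int × Int) : String :=
  PySem.Int.toStr ic.2 ++ "x_" ++ PySem.Int.toStr ic.1

def get_eq_py_alt (raw : List Int) (b_p : List Int) : String :=
  -- body = '+'.join(f"{c}x_{i}" for i, c in enumerate(raw, 1)).replace('+-', '-')
  let body := PySem.Str.replace (PySem.Str.join "+" ((PySem.List.enumerate raw 1).map pvTermB)) "+-" "-"
  -- return f"{body}={b_p[0]}"  (b_p[0]: Pre_ guarantees b_p ≠ [])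
  body ++ "=" ++ PySem.Int.toStr (PySem.List.pyGetD b_p 0 0)

-- ===== PRECONDITION & SPEC =====
-- A raises IndexError on raw[0] when raw = [] and on b_p[0] when b_p = []; exactly those inputs are excluded.
def Pre_get_eq_py (raw : List Int) (b_p : List Int) : Prop := raw ≠ [] ∧ b_p ≠ []
instance (raw : List Int) (b_p : List Int) : Decidable (Pre_get_eq_py raw b_p) := by unfold Pre_get_eq_py; infer_instance
def pvWitness_get_eq_py : List Int × List Int := ([3, -2, 0], [7])

def Spec_get_eq_py (raw : List Int) (b_p : List Int) (out : String) : Prop := out = get_eq_py_alt raw b_p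
instance (raw : List Int) (b_p : List Int) (out : String) : Decidable (Spec_get_eq_py raw b_p out) := by unfold Spec_get_eq_py; infer_instance

-- ===== CLAIM =====
def Claim_equal_get_eq_py : Prop := ∀ (raw : List Int) (b_p : List Int), Dom_get_eq_py raw b_p → Pre_get_eq_py raw b_p → Spec_get_eq_py raw b_p (get_eq_py raw b_p)

-- ===== LEMMAS AND PROOFS =====

-- the signed term A builds for a non-first coefficient
def pvTermA (ic : Int × Int) : String :=
  (if ic.2 ≥ 0 then "+" else "") ++ pvTermB ic

-- replace('+-','-') as a clean structural recursion on the characters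
def pvRep : List Char → List Char
  | [] => []
  | [c] => [c]
  | c :: d :: t => if c = '+' ∧ d = '-' then '-' :: pvRep t else c :: pvRep (d :: t)

-- str(n) never contains '+'; its head is '-' iff n < 0
lemma digitChar_big (n : Nat) (h : 16 ≤ n) : Nat.digitChar n = '*' := by
  simp [Nat.digitChar, show n≠0 by omega, show n≠1 by omega, show n≠2 by omega,
    show n≠3 by omega, show n≠4 by omega, show n≠5 by omega, show n≠6 by omega,
    show n≠7 by omega, show n≠8 by omega, show n≠9 by omega, show n≠10 by omega,
    show n≠11 by omega, show n≠12 by omega, show n≠13 by omega, show n≠14 by omega,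
    show n≠15 by omega]

lemma digitChar_ne_plus (n : Nat) : Nat.digitChar n ≠ '+' := by
  rcases Nat.lt_or_ge n 16 with h | h
  · interval_cases n <;> decide
  · rw [digitChar_big n h]; decide

lemma digitChar_ne_minus (n : Nat) : Nat.digitChar n ≠ '-' := by
  rcases Nat.lt_or_ge n 16 with h | h
  · interval_cases n <;> decide
  · rw [digitChar_big n h]; decide

lemma toDigitsCore_ne_plus (b f n : Nat) (l : List Char) (hl : ∀ c ∈ l, c ≠ '+') :
    ∀ c ∈ Nat.toDigitsCore b f n l, c ≠ '+' := by
  induction f generalizing n l with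
  | zero => simpa [Nat.toDigitsCore] using hl
  | succ f ih =>
    simp only [Nat.toDigitsCore]
    split
    · intro c hc
      rcases List.mem_cons.mp hc with h | h
      · subst h; exact digitChar_ne_plus _
      · exact hl _ h
    · exact ih _ _ (by
        intro c hc
        rcases List.mem_cons.mp hc with h | h
        · subst h; exact digitChar_ne_plus _
        · exact hl _ h)

lemma toDigitsCore_ne_nil (b f n : Nat) (l : List Char) :
    Nat.toDigitsCore b (f+1) n l ≠ [] := by
  induction f generalizing n l with
  | zero =>
    simp only [Nat.toDigitsCore]
    split <;> simp
  | succ f ih =>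
    simp only [Nat.toDigitsCore]
    split
    · simp
    · exact ih _ _

lemma toChars_noPlus (n : Int) : ∀ c ∈ PySem.Int.toChars n, c ≠ '+' := by
  unfold PySem.Int.toChars
  split
  · intro c hc
    rcases List.mem_cons.mp hc with h | h
    · subst h; decide
    · exact toDigitsCore_ne_plus 10 _ _ [] (by simp) c h
  · exact toDigitsCore_ne_plus 10 _ _ [] (by simp)

lemma toDigitsCore_ne_minus (b f n : Nat) (l : List Char) (hl : ∀ c ∈ l, c ≠ '-') :
    ∀ c ∈ Nat.toDigitsCore b f n l, c ≠ '-' := by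
  induction f generalizing n l with
  | zero => simpa [Nat.toDigitsCore] using hl
  | succ f ih =>
    simp only [Nat.toDigitsCore]
    split
    · intro c hc
      rcases List.mem_cons.mp hc with h | h
      · subst h; exact digitChar_ne_minus _
      · exact hl _ h
    · exact ih _ _ (by
        intro c hc
        rcases List.mem_cons.mp hc with h | h
        · subst h; exact digitChar_ne_minus _
        · exact hl _ h)

lemma toChars_head (n : Int) :
    ∃ c cs, PySem.Int.toChars n = c :: cs ∧ ((c = '-') ↔ n < 0) := by
  unfold PySem.Int.toChars
  split
  · exact ⟨'-', _, rfl, by simp; omega⟩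
  · have hne : Nat.toDigits 10 n.toNat ≠ [] := toDigitsCore_ne_nil 10 _ _ []
    cases hd : Nat.toDigits 10 n.toNat with
    | nil => exact absurd hd hne
    | cons c cs =>
      refine ⟨c, cs, rfl, ?_⟩
      have hc : c ≠ '-' :=
        toDigitsCore_ne_minus 10 _ _ [] (by simp) c (hd ▸ List.mem_cons_self)
      simp [hc]; omega

-- pvRep on the fuelled go of PySem.Chars.replace
lemma go_eq_pvRep (fuel : Nat) (l acc : List Char) (h : l.length ≤ fuel) :
    PySem.Chars.replace.go ['+', '-'] ['-'] fuel l acc = acc.reverse ++ pvRep l := by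
  induction fuel generalizing l acc with
  | zero =>
    have : l = [] := List.length_eq_zero_iff.mp (Nat.le_zero.mp h)
    subst this
    simp [PySem.Chars.replace.go, pvRep]
  | succ fuel ih =>
    cases l with
    | nil => simp [PySem.Chars.replace.go, pvRep]
    | cons c t =>
      rw [PySem.Chars.replace.go]
      by_cases hp : List.isPrefixOf ['+', '-'] (c :: t) = true
      · cases t with
        | nil => simp [List.isPrefixOf] at hp
        | cons d t' =>
          simp only [List.isPrefixOf, Bool.and_eq_true, beq_iff_eq] at hp
          obtain ⟨hc, hd, -⟩ := hp
          subst hc; subst hd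
          rw [if_pos (by simp [List.isPrefixOf])]
          have hlen : t'.length ≤ fuel := by simp at h; omega
          simp only [List.length_cons, List.drop_succ_cons, List.drop_zero, List.length_nil]
          rw [ih _ _ hlen]
          simp [pvRep]
      · rw [if_neg hp]
        have hlen : t.length ≤ fuel := by simp at h; omega
        rw [ih _ _ hlen]
        cases t with
        | nil => simp [pvRep]
        | cons d t' =>
          simp only [List.isPrefixOf, Bool.and_eq_true, beq_iff_eq] at hp
          rw [show pvRep (c :: d :: t') = c :: pvRep (d :: t') by
            rw [pvRep]; rw [if_neg (by tauto)]]
          simp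

-- pvRep skips '+'-free segments
lemma pvRep_skip (u l : List Char) (hu : ∀ c ∈ u, c ≠ '+') :
    pvRep (u ++ l) = u ++ pvRep l := by
  induction u with
  | nil => simp
  | cons c u' ih =>
    have hc : c ≠ '+' := hu c List.mem_cons_self
    have hu' : ∀ x ∈ u', x ≠ '+' := fun x hx => hu x (List.mem_cons_of_mem _ hx)
    cases hul : u' ++ l with
    | nil => simp [pvRep, List.append_eq_nil_iff.mp hul]
    | cons d t =>
      simp only [List.cons_append, hul]
      rw [pvRep, if_neg (by tauto)]
      rw [← hul, ih hu']

-- pvRep over a joined tail of nonempty '+'-free terms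
lemma pvRep_join (ts : List (List Char))
    (h : ∀ t ∈ ts, t ≠ [] ∧ ∀ c ∈ t, c ≠ '+') :
    pvRep (ts.flatMap (fun t => '+' :: t))
      = ts.flatMap (fun t => (if t.head? = some '-' then [] else ['+']) ++ t) := by
  induction ts with
  | nil => simp [pvRep]
  | cons t ts ih =>
    obtain ⟨hne, hnp⟩ := h t List.mem_cons_self
    have hrest : ∀ x ∈ ts, x ≠ [] ∧ ∀ c ∈ x, c ≠ '+' :=
      fun x hx => h x (List.mem_cons_of_mem _ hx)
    cases t with
    | nil => exact absurd rfl hne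
    | cons d t' =>
      have hnp' : ∀ c ∈ t', c ≠ '+' := fun c hc => hnp c (List.mem_cons_of_mem _ hc)
      by_cases hd : d = '-'
      · subst hd
        simp only [List.flatMap_cons, List.cons_append]
        rw [pvRep, if_pos (by simp)]
        rw [show t' ++ List.flatMap (fun t => '+' :: t) ts
              = t' ++ List.flatMap (fun t => '+' :: t) ts from rfl,
            pvRep_skip t' _ hnp', ih hrest]
        simp
      · simp only [List.flatMap_cons, List.cons_append]
        rw [pvRep, if_neg (by tauto)]
        rw [show d :: (t' ++ List.flatMap (fun t => '+' :: t) ts)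
              = (d :: t') ++ List.flatMap (fun t => '+' :: t) ts from rfl,
            pvRep_skip (d :: t') _ hnp, ih hrest]
        simp [hd]

-- replace('+-','-') is pvRep
lemma replace_eq_pvRep (s : List Char) :
    PySem.Chars.replace s ['+', '-'] ['-'] = pvRep s := by
  rw [PySem.Chars.replace, if_neg (by decide)]
  simpa using go_eq_pvRep s.length s [] le_rfl

-- '+'.join
lemma join_plus (x : List Char) (xs : List (List Char)) :
    PySem.Chars.join ['+'] (x :: xs) = x ++ xs.flatMap (fun t => '+' :: t) := by
  induction xs generalizing x with
  | nil => simp [PySem.Chars.join, List.intercalate]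
  | cons y ys ih =>
    have h1 : PySem.Chars.join ['+'] (x :: y :: ys) = x ++ '+' :: PySem.Chars.join ['+'] (y :: ys) := by
      simp [PySem.Chars.join, List.intercalate, List.intersperse]
    rw [h1, ih y]
    simp

lemma chars_join_nil (ll : List (List Char)) : PySem.Chars.join [] ll = ll.flatten := by
  unfold PySem.Chars.join
  induction ll with
  | nil => simp [List.intercalate]
  | cons x xs ih =>
    cases xs with
    | nil => simp [List.intercalate]
    | cons y ys => simp_all [List.intercalate, List.intersperse]

-- the characters of a B-term
lemma termB_toList (ic : Int × Int) :
    (pvTermB ic).toList = PySem.Int.toChars ic.2 ++ 'x' :: '_' :: PySem.Int.toChars ic.1 := by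
  unfold pvTermB
  have hx : ("x_" : String).toList = ['x', '_'] := by decide
  simp [String.toList_append, PySem.Int.toList_toStr, hx]

lemma termB_noPlus (ic : Int × Int) : ∀ c ∈ (pvTermB ic).toList, c ≠ '+' := by
  intro c hc
  rw [termB_toList] at hc
  rcases List.mem_append.mp hc with h | h
  · exact toChars_noPlus _ c h
  · rcases List.mem_cons.mp h with h | h
    · subst h; decide
    · rcases List.mem_cons.mp h with h | h
      · subst h; decide
      · exact toChars_noPlus _ c h

lemma termB_shape (ic : Int × Int) :
    ∃ c cs, (pvTermB ic).toList = c :: cs ∧ ((c = '-') ↔ ic.2 < 0) := by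
  obtain ⟨c, cs, hc, hiff⟩ := toChars_head ic.2
  refine ⟨c, cs ++ ('x' :: '_' :: PySem.Int.toChars ic.1), ?_, hiff⟩
  rw [termB_toList, hc]
  simp

lemma termB_fix (ic : Int × Int) :
    (if ((pvTermB ic).toList).head? = some '-' then ([] : List Char) else ['+'])
      ++ (pvTermB ic).toList = (pvTermA ic).toList := by
  obtain ⟨c, cs, hc, hiff⟩ := termB_shape ic
  unfold pvTermA
  by_cases hneg : ic.2 < 0
  · have hcm : c = '-' := hiff.mpr hneg
    rw [if_neg (by omega : ¬ ic.2 ≥ 0)]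
    simp [hc, hcm]
  · have hcne : c ≠ '-' := fun h => hneg (hiff.mp h)
    rw [if_pos (by omega : ic.2 ≥ 0)]
    simp [hc, hcne, String.toList_append]

-- indexing the tail
lemma pyGetD_cons_succ (x : Int) (xs : List Int) (i : Int) (h : 0 ≤ i) (d : Int) :
    PySem.List.pyGetD (x :: xs) (i+1) d = PySem.List.pyGetD xs i d := by
  simp only [PySem.List.pyGetD, PySem.List.pyGet?, PySem.List.pyIdx?, List.length_cons]
  have h1 : (0:Int) ≤ i + 1 := by omega
  rw [if_pos h1, if_pos h]
  by_cases hlt : i < (xs.length : Int)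
  · rw [if_pos (by push_cast; omega), if_pos (by exact_mod_cast hlt)]
    simp only [Option.bind_some]
    have : (i+1).toNat = i.toNat + 1 := by omega
    rw [this]
    simp
  · rw [if_neg (by push_cast; omega), if_neg (by exact_mod_cast hlt)]
    simp

-- index shift for enumerate
lemma enumerate_shift (xs : List Int) (s : Int) :
    PySem.List.enumerate xs s = (PySem.List.enumerate xs 0).map (fun p => (p.1 + s, p.2)) := by
  induction xs generalizing s with
  | nil => simp [PySem.List.enumerate_nil]
  | cons x xs ih =>
    rw [PySem.List.enumerate_cons, PySem.List.enumerate_cons]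
    simp only [zero_add]
    rw [ih (s + 1), ih 1]
    simp only [List.map_map, List.map_cons]
    refine List.cons_eq_cons.mpr ⟨by simp, ?_⟩
    apply List.map_congr_left; intro p _; simp; omega

lemma flatMap_single {a b : Type} (f : a → b) (l : List a) :
    List.flatMap (fun x => [f x]) l = l.map f := by
  induction l with
  | nil => simp
  | cons x xs ih => simp [ih]

-- A's loop produces exactly the signed terms of the tail coefficients
lemma loop_eq_map (r0 : Int) (rest : List Int) (init : List String) :
    ((PySem.List.pyRange 0 (PySem.List.len (r0 :: rest) - 1) 1).foldl (fun res i =>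
      if PySem.List.pyGetD (r0 :: rest) (i + 1) 0 ≥ 0 then
        res ++ ["+" ++ PySem.Int.toStr (PySem.List.pyGetD (r0 :: rest) (i + 1) 0) ++ "x_" ++ PySem.Int.toStr (i + 2)]
      else
        res ++ [PySem.Int.toStr (PySem.List.pyGetD (r0 :: rest) (i + 1) 0) ++ "x_" ++ PySem.Int.toStr (i + 2)]) init)
      = init ++ (PySem.List.enumerate rest 2).map pvTermA := by
  have hlen : PySem.List.len (r0 :: rest) - 1 = PySem.List.len rest := by
    simp [PySem.List.len_eq]
  rw [hlen]
  have hcongr : ∀ (res : List String), ∀ i ∈ PySem.List.pyRange 0 (PySem.List.len rest) 1,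
      (if PySem.List.pyGetD (r0 :: rest) (i + 1) 0 ≥ 0 then
        res ++ ["+" ++ PySem.Int.toStr (PySem.List.pyGetD (r0 :: rest) (i + 1) 0) ++ "x_" ++ PySem.Int.toStr (i + 2)]
      else
        res ++ [PySem.Int.toStr (PySem.List.pyGetD (r0 :: rest) (i + 1) 0) ++ "x_" ++ PySem.Int.toStr (i + 2)])
      = res ++ [pvTermA (i + 2, PySem.List.pyGetD rest i 0)] := by
    intro res i hi
    have h0 : 0 ≤ i := (PySem.List.mem_pyRange_one.mp hi).1
    rw [pyGetD_cons_succ r0 rest i h0 0]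
    unfold pvTermA pvTermB
    split <;> simp [String.append_assoc]
  rw [PySem.List.foldl_congr_mem _ _ _ init hcongr,
      PySem.List.foldl_append_eq_flatMap]
  congr 1
  rw [flatMap_single]
  rw [enumerate_shift rest 2, PySem.List.enumerate_eq_map_pyRange rest 0]
  simp [List.map_map, Function.comp]

-- ===== VERDICT =====
theorem get_eq_py_spec : Claim_equal_get_eq_py := by
  intro raw b_p _ hpre
  obtain ⟨hraw, hbp⟩ := hpre
  unfold Spec_get_eq_py
  cases raw with
  | nil => exact absurd rfl hraw
  | cons r0 rest =>
    unfold get_eq_py get_eq_py_alt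
    simp only [List.nil_append]
    rw [loop_eq_map r0 rest]
    rw [PySem.List.enumerate_cons, show (1 : Int) + 1 = 2 by norm_num]
    apply String.toList_inj.mp
    simp only [PySem.Str.toList_join, PySem.Str.toList_replace, String.toList_append,
      List.map_cons, List.map_append, List.map_map, List.map_nil, PySem.Int.toList_toStr,
      show ("" : String).toList = [] by decide,
      show ("x_1" : String).toList = ['x', '_', '1'] by decide,
      show ("=" : String).toList = ['='] by decide,
      show PySem.List.pyGetD (r0 :: rest) 0 0 = r0 by
        simp [PySem.List.pyGetD, PySem.List.pyGet?, PySem.List.pyIdx?]]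
    rw [chars_join_nil, show ("+" : String).toList = ['+'] by decide,
        show ("+-" : String).toList = ['+', '-'] by decide,
        show ("-" : String).toList = ['-'] by decide,
        join_plus, replace_eq_pvRep]
    rw [pvRep_skip _ _ (termB_noPlus (1, r0))]
    have hrep : pvRep (List.flatMap (fun t => '+' :: t)
          ((PySem.List.enumerate rest 2).map (String.toList ∘ pvTermB)))
        = List.flatMap (String.toList ∘ pvTermA) (PySem.List.enumerate rest 2) := by
      rw [pvRep_join _ (by
        intro t ht
        simp only [List.mem_map] at ht
        obtain ⟨ic, -, rfl⟩ := ht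
        obtain ⟨c', cs', hc', -⟩ := termB_shape ic
        exact ⟨by simp [Function.comp, hc'], by
          intro x hx
          exact termB_noPlus ic x (by simpa [Function.comp] using hx)⟩)]
      rw [List.flatMap_map]
      congr 1
      funext ic
      simpa [Function.comp] using termB_fix ic
    rw [hrep]
    simp [termB_toList, List.flatMap_def, show PySem.Int.toChars 1 = [Char.ofNat 49] by decide]
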